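-- pv_equiv track=rewrite | github.com/pypi-data/pypi-mirror-397 | packages/nemotron-ocr/nemotron_ocr-1.0.0-py3-none-any.whl/nemotron_ocr/inference/encoders/relational_encoder.py | in_chain_to_groups
-- ===== SOURCE A (Python) =====
-- def in_chain_to_groups(in_chain: dict, num_regions: int):
--     out_chain = {v[0]: k for k, v in in_chain.items()}
--
--     processed = set()
--     groups = []
--     for to_idx, (from_idx, conf) in in_chain.items():
--         if to_idx in processed:
--             continue
--
--         # Find the start of the chain
--         cycle_set = {from_idx}
--         is_cycle = False
--         while from_idx in in_chain:
--             to_idx = from_idx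
--             from_idx = in_chain[to_idx][0]
--             if from_idx in cycle_set:
--                 is_cycle = True
--                 break
--
--         # Completely ignore cycle chains
--         if is_cycle:
--             continue
--
--         group = [from_idx]
--         processed.add(from_idx)
--         while to_idx in out_chain:
--             processed.add(to_idx)
--             group.append(to_idx)
--             to_idx = out_chain[to_idx]
--         group.append(to_idx)
--         processed.add(to_idx)
--
--         groups.append(group)
--
--     # Now add in the stragglers
--     for w_idx in range(num_regions):
--         if w_idx not in processed:
--             groups.append([w_idx])
--
--     return groups
-- ===== SOURCE B (Python) =====
-- def in_chain_to_groups(in_chain: dict, num_regions: int):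
--     out_chain = {v[0]: k for k, v in in_chain.items()}
--
--     # Pointer jumping (binary lifting): jump[t] = (r, l) where r is the node reached
--     # from t after 2**k backward steps (nodes outside the dict are fixed points) and
--     # l is the node visited just before leaving the dict (the last dict key of the
--     # walk).  With 2**k > len(in_chain), r is the start of t's chain whenever the
--     # chain leaves the dict, and r is still a dict key iff t sits on a cycle.
--     jump = {t: (v[0], t) for t, v in in_chain.items()}
--     for _ in range(len(in_chain).bit_length()):
--         jump = {t: (jump[rl[0]] if rl[0] in jump else rl) for t, rl in jump.items()}
--
--     processed = set()
--     groups = []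
--     for t, (f, _conf) in in_chain.items():
--         if t in processed:
--             continue
--         start, last = jump.get(f, (f, t))
--         if start in in_chain:
--             # f's backward orbit never leaves the keys: a cycle chain, ignore
--             continue
--         group = [start]
--         x = last
--         while x in out_chain:
--             group.append(x)
--             x = out_chain[x]
--         group.append(x)
--         processed.update(group)
--         groups.append(group)
--
--     # Now add in the stragglers
--     for w_idx in range(num_regions):
--         if w_idx not in processed:
--             groups.append([w_idx])
--
--     return groups
-- ===== Notes on version B (the rewrite author's own statement) =====
-- stated objective: alternative
-- what changed: B drops A's per-entry backward while-walk (whose singleton cycle_set both detects cycles and finds chain starts) and instead precomputes one global jump table by repeated squaring of the successor map (binary lifting, bit_length(n) doubling passes, each entry carrying the 2^k-step endpoint and the last key before leaving the dict), so each entry's chain-start/cycle resolution becomes a single dict lookup before the shared forward walk.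
import Mathlib
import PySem

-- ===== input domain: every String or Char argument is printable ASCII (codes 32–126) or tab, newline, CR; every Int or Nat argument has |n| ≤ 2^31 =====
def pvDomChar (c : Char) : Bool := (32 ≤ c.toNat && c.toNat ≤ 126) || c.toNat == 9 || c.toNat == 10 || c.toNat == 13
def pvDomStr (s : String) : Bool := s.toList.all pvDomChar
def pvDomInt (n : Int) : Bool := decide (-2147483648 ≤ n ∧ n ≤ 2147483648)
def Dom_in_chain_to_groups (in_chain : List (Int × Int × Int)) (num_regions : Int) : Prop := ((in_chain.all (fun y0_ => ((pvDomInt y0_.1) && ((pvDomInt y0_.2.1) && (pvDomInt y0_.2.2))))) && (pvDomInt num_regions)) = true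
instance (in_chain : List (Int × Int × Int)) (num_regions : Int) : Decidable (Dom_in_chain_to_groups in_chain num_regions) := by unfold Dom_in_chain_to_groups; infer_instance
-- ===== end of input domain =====

-- B replaces A's per-entry backward while-walk by one global binary-lifting (pointer-jumping)
-- jump table built by repeated squaring of the successor map; objective: alternative
-- algorithm (a different chain-resolution strategy, not claimed faster).

-- ===== PORT A =====
-- the dict argument (the harness hands it over as an association list; building the
-- Python dict collapses duplicate keys, last value wins, first position kept — exactly Dict.insert)
def pvDict (in_chain : List (Int × Int × Int)) : PySem.Dict Int (Int × Int) :=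
  in_chain.foldl (fun d x => d.insert x.1 x.2) PySem.Dict.empty

-- out_chain = {v[0]: k for k, v in in_chain.items()}  (this line appears verbatim in both A and B)
def pvOut (d : PySem.Dict Int (Int × Int)) : PySem.Dict Int Int :=
  d.items.foldl (fun o p => o.insert p.2.1 p.1) PySem.Dict.empty

-- A's backward 'while from_idx in in_chain' loop (fuel is only a totality guard; it is
-- never exhausted on inputs satisfying Pre_): returns (to_idx, from_idx, is_cycle)
def pvBackA (d : PySem.Dict Int (Int × Int)) (cyc : PySem.Set Int) :
    Nat → Int → Int → Int × Int × Bool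
  | 0, toI, frI => (toI, frI, true)
  | fuel+1, toI, frI =>
    if d.contains frI then
      let toI' := frI
      let frI' := (d.getD frI (0, 0)).1
      if PySem.Set.contains cyc frI' then (toI', frI', true)
      else pvBackA d cyc fuel toI' frI'
    else (toI, frI, false)

-- A's forward 'while to_idx in out_chain' loop building group and processed
def pvFwdA (o : PySem.Dict Int Int) :
    Nat → Int → List Int → PySem.Set Int → List Int × PySem.Set Int
  | 0, _, group, proc => (group, proc)
  | fuel+1, toI, group, proc =>
    if o.contains toI then
      pvFwdA o fuel (o.getD toI 0) (group ++ [toI]) (PySem.Set.add proc toI)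
    else (group ++ [toI], PySem.Set.add proc toI)

-- one iteration of A's 'for to_idx, (from_idx, conf) in in_chain.items()' loop
def pvStepA (d : PySem.Dict Int (Int × Int)) (o : PySem.Dict Int Int)
    (st : PySem.Set Int × List (List Int)) (p : Int × Int × Int) :
    PySem.Set Int × List (List Int) :=
  if PySem.Set.contains st.1 p.1 then st
  else
    let r := pvBackA d (PySem.Set.add PySem.Set.empty p.2.1) (d.size + 2) p.1 p.2.1
    if r.2.2 then st
    else
      let fw := pvFwdA o (d.size + 2) r.1 [r.2.1] (PySem.Set.add st.1 r.2.1)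
      (fw.2, st.2 ++ [fw.1])

def in_chain_to_groups (in_chain : List (Int × Int × Int)) (num_regions : Int) : List (List Int) :=
  let d := pvDict in_chain
  let o := pvOut d
  let st := d.items.foldl (pvStepA d o) (PySem.Set.empty, [])
  (PySem.List.pyRange 0 num_regions 1).foldl
    (fun gs w => if PySem.Set.contains st.1 w then gs else gs ++ [[w]]) st.2

-- ===== PORT B =====
-- jump = {t: (v[0], t) for t, v in in_chain.items()}
def pvJump0 (d : PySem.Dict Int (Int × Int)) : PySem.Dict Int (Int × Int) :=
  d.items.foldl (fun j p => j.insert p.1 (p.2.1, p.1)) PySem.Dict.empty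

-- jump = {t: (jump[rl[0]] if rl[0] in jump else rl) for t, rl in jump.items()}
def pvSquare (j : PySem.Dict Int (Int × Int)) : PySem.Dict Int (Int × Int) :=
  j.items.foldl
    (fun j' p => j'.insert p.1 (if j.contains p.2.1 then j.getD p.2.1 (0, 0) else p.2))
    PySem.Dict.empty

-- for _ in range(len(in_chain).bit_length()): jump = square(jump)
def pvLift : Nat → PySem.Dict Int (Int × Int) → PySem.Dict Int (Int × Int)
  | 0, j => j
  | k+1, j => pvLift k (pvSquare j)

-- B's forward 'while x in out_chain' loop (fuel: totality guard only)
def pvChainB (o : PySem.Dict Int Int) : Nat → Int → List Int → List Int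
  | 0, _, group => group
  | fuel+1, x, group =>
    if o.contains x then pvChainB o fuel (o.getD x 0) (group ++ [x])
    else group ++ [x]

-- one iteration of B's main loop
def pvStepB (d : PySem.Dict Int (Int × Int)) (o : PySem.Dict Int Int)
    (jmp : PySem.Dict Int (Int × Int))
    (st : PySem.Set Int × List (List Int)) (p : Int × Int × Int) :
    PySem.Set Int × List (List Int) :=
  if PySem.Set.contains st.1 p.1 then st
  else
    let sl := jmp.getD p.2.1 (p.2.1, p.1)
    if d.contains sl.1 then st
    else
      let group := pvChainB o (d.size + 2) sl.2 [sl.1]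
      (PySem.Set.update st.1 group, st.2 ++ [group])

def in_chain_to_groups_alt (in_chain : List (Int × Int × Int)) (num_regions : Int) : List (List Int) :=
  let d := pvDict in_chain
  let o := pvOut d
  let jmp := pvLift (PySem.Int.bitLength (d.size : Int)) (pvJump0 d)
  let st := d.items.foldl (pvStepB d o jmp) (PySem.Set.empty, [])
  (PySem.List.pyRange 0 num_regions 1).foldl
    (fun gs w => if PySem.Set.contains st.1 w then gs else gs ++ [[w]]) st.2

-- ===== PRECONDITION & SPEC =====
-- one backward step of the chain relation: f x = in_chain[x][0] for keys, identity elsewhere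
def pvF (d : PySem.Dict Int (Int × Int)) (x : Int) : Int := (d.getD x (x, 0)).1

-- Pre_ excludes exactly the dicts with a rho-shaped backward chain (a key at backward
-- distance ≥ 2 from a cycle): there A's 'while' loop DIVERGES (its cycle_set never grows),
-- so A returns nothing at all.  The clause is the standard closed-form termination condition
-- for a functional graph: within |dict|+2 backward steps every key's orbit either leaves the
-- keys or returns to its first step.
def Pre_in_chain_to_groups (in_chain : List (Int × Int × Int)) (num_regions : Int) : Prop :=
  ∀ t ∈ (pvDict in_chain).keys, ∃ i ∈ Finset.Icc 2 ((pvDict in_chain).size + 2),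
    (pvF (pvDict in_chain))^[i] t ∉ (pvDict in_chain).keys ∨
    (pvF (pvDict in_chain))^[i] t = pvF (pvDict in_chain) t

instance (in_chain : List (Int × Int × Int)) (num_regions : Int) : Decidable (Pre_in_chain_to_groups in_chain num_regions) := by unfold Pre_in_chain_to_groups; infer_instance

def pvWitness_in_chain_to_groups : (List (Int × Int × Int)) × Int := ([(1, 0, 5), (2, 1, 7), (4, 4, 1)], 6)

def Spec_in_chain_to_groups (in_chain : List (Int × Int × Int)) (num_regions : Int) (out : List (List Int)) : Prop := out = in_chain_to_groups_alt in_chain num_regions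
instance (in_chain : List (Int × Int × Int)) (num_regions : Int) (out : List (List Int)) : Decidable (Spec_in_chain_to_groups in_chain num_regions out) := by unfold Spec_in_chain_to_groups; infer_instance

-- ===== CLAIM (what is proved, stated in full; the proofs are below) =====
def Claim_equal_in_chain_to_groups : Prop := ∀ (in_chain : List (Int × Int × Int)) (num_regions : Int), Dom_in_chain_to_groups in_chain num_regions → Pre_in_chain_to_groups in_chain num_regions → Spec_in_chain_to_groups in_chain num_regions (in_chain_to_groups in_chain num_regions)

-- ===== LEMMAS AND PROOFS =====

theorem pv_keys_nodup (l : List (Int × Int × Int)) : (pvDict l).keys.Nodup :=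
  PySem.Dict.nodup_keys_foldl_insert_key l (fun x => x.1) (fun _ x => x.2)
    PySem.Dict.empty PySem.Dict.nodup_keys_empty

theorem pv_fix {d : PySem.Dict Int (Int × Int)} {x : Int} (h : x ∉ d.keys) : pvF d x = x := by
  unfold pvF
  rw [PySem.Dict.getD_eq_get?_getD, (PySem.Dict.get?_eq_none_iff_not_mem_keys _ _).2 h]
  rfl

theorem pv_iter_fix {d : PySem.Dict Int (Int × Int)} {x : Int} (h : x ∉ d.keys) (m : Nat) :
    (pvF d)^[m] x = x :=
  Function.iterate_fixed (pv_fix h) m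

theorem pv_stab {d : PySem.Dict Int (Int × Int)} {x : Int} {j m : Nat}
    (h : (pvF d)^[j] x ∉ d.keys) (hjm : j ≤ m) : (pvF d)^[m] x = (pvF d)^[j] x := by
  obtain ⟨r, rfl⟩ : ∃ r, m = r + j := ⟨m - j, by omega⟩
  rw [Function.iterate_add_apply]
  exact pv_iter_fix h r

theorem pv_dup_bound {d : PySem.Dict Int (Int × Int)} {x : Int} {a b : Nat}
    (hab : a < b) (heq : (pvF d)^[a] x = (pvF d)^[b] x) (i : Nat) :
    ∃ j, j < b ∧ (pvF d)^[i] x = (pvF d)^[j] x := by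
  induction i with
  | zero => exact ⟨0, by omega, rfl⟩
  | succ i ih =>
    obtain ⟨j, hj, he⟩ := ih
    by_cases hb : j + 1 < b
    · exact ⟨j + 1, hb, by rw [Function.iterate_succ_apply', Function.iterate_succ_apply', he]⟩
    · have hjb : j + 1 = b := by omega
      refine ⟨a, hab, ?_⟩
      rw [Function.iterate_succ_apply', he, ← Function.iterate_succ_apply' (pvF d) j x,
        show j.succ = b by omega, ← heq]

theorem pv_all_mem {d : PySem.Dict Int (Int × Int)} {x : Int}
    (h : ∀ j ≤ d.size, (pvF d)^[j] x ∈ d.keys) (i : Nat) : (pvF d)^[i] x ∈ d.keys := by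
  have hcard : d.keys.toFinset.card < (Finset.range (d.size + 1)).card := by
    have h1 : d.keys.toFinset.card ≤ d.keys.length := d.keys.toFinset_card_le
    have h2 : d.keys.length = d.size := by
      simp [PySem.Dict.keys, PySem.Dict.size]
    simp only [Finset.card_range]
    omega
  obtain ⟨a, ha, b, hb, hne, hab⟩ :=
    Finset.exists_ne_map_eq_of_card_lt_of_maps_to hcard
      (f := fun j => (pvF d)^[j] x)
      (fun j hj => List.mem_toFinset.2 (h j (Nat.lt_succ_iff.1 (Finset.mem_range.1 hj))))
  simp only [Finset.mem_range] at ha hb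
  rcases Nat.lt_or_ge a b with hlt | hge
  · obtain ⟨j, hj, he⟩ := pv_dup_bound hlt hab i
    rw [he]; exact h j (by omega)
  · have hlt : b < a := by omega
    obtain ⟨j, hj, he⟩ := pv_dup_bound hlt hab.symm i
    rw [he]; exact h j (by omega)

theorem pv_f_of_mem {d : PySem.Dict Int (Int × Int)} (hnd : d.keys.Nodup)
    {p : Int × Int × Int} (hp : p ∈ d.items) : pvF d p.1 = p.2.1 := by
  unfold pvF
  rw [PySem.Dict.getD_of_mem_items d (k := p.1) (v := p.2) (by simpa using hp) hnd]

theorem pv_mem_keys_exists {d : PySem.Dict Int (Int × Int)} (hnd : d.keys.Nodup)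
    {t : Int} (ht : t ∈ d.keys) : ∃ v, d.get? t = some v ∧ (t, v) ∈ d.items ∧ pvF d t = v.1 := by
  obtain ⟨v, hv⟩ : ∃ v, d.get? t = some v := by
    rcases h : d.get? t with _ | v
    · exact absurd ((PySem.Dict.get?_eq_none_iff_not_mem_keys d t).1 h) (not_not.2 ht)
    · exact ⟨v, rfl⟩
  refine ⟨v, hv, (PySem.Dict.get?_eq_some_iff_mem_items d t v hnd).1 hv, ?_⟩
  unfold pvF
  rw [PySem.Dict.getD_of_get?_eq_some _ _ hv]

theorem pv_getD00 {d : PySem.Dict Int (Int × Int)} {x : Int} (h : x ∈ d.keys) :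
    (d.getD x (0, 0)).1 = pvF d x := by
  obtain ⟨v, hv⟩ : ∃ v, d.get? x = some v := by
    rcases hq : d.get? x with _ | v
    · exact absurd ((PySem.Dict.get?_eq_none_iff_not_mem_keys d x).1 hq) (not_not.2 h)
    · exact ⟨v, rfl⟩
  unfold pvF
  rw [PySem.Dict.getD_of_get?_eq_some _ _ hv, PySem.Dict.getD_of_get?_eq_some _ _ hv]

theorem pv_contains_eq {d : PySem.Dict Int (Int × Int)} (x : Int) :
    d.contains x = decide (x ∈ d.keys) := PySem.Dict.contains_eq_decide_mem_keys d x

theorem pv_set1_contains (c x : Int) :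
    PySem.Set.contains (PySem.Set.add PySem.Set.empty c) x = decide (x = c) := by
  show List.contains [c] x = decide (x = c)
  simp

-- the jump-table invariant: after the squarings that produced G, G maps every key t to
-- (the 2^i-step iterate of t, the node visited just before t's orbit leaves the keys —
-- or the (2^i - 1)-step iterate while the orbit has not left yet)
def pvInv2 (d : PySem.Dict Int (Int × Int)) (G : PySem.Dict Int (Int × Int)) (m : Nat) : Prop :=
  G.keys = d.keys ∧ ∀ t ∈ d.keys, ∃ lv,
    G.get? t = some ((pvF d)^[m] t, lv) ∧
    ((∃ j, 1 ≤ j ∧ j ≤ m ∧ (pvF d)^[j] t ∉ d.keys ∧ (∀ i < j, (pvF d)^[i] t ∈ d.keys) ∧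
        lv = (pvF d)^[j-1] t)
     ∨ ((∀ j ≤ m, (pvF d)^[j] t ∈ d.keys) ∧ lv = (pvF d)^[m-1] t))

theorem pv_jump0_items {d : PySem.Dict Int (Int × Int)} (hnd : d.keys.Nodup) :
    (pvJump0 d).items = d.items.map (fun p => (p.1, (p.2.1, p.1))) := by
  unfold pvJump0
  rw [PySem.Dict.items_foldl_insert_fresh d.items (fun p => p.1) (fun p => (p.2.1, p.1))
    PySem.Dict.empty (fun a _ => by simp) (by simpa [PySem.Dict.keys] using hnd)]
  simp [PySem.Dict.empty]

theorem pv_inv0 {d : PySem.Dict Int (Int × Int)} (hnd : d.keys.Nodup) : pvInv2 d (pvJump0 d) 1 := by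
  have hkeys : (pvJump0 d).keys = d.keys := by
    simp [PySem.Dict.keys, pv_jump0_items hnd, Function.comp_def]
  refine ⟨hkeys, fun t ht => ?_⟩
  obtain ⟨v, hv, hm, hf⟩ := pv_mem_keys_exists hnd ht
  have hmem : (t, (v.1, t)) ∈ (pvJump0 d).items := by
    rw [pv_jump0_items hnd]; exact List.mem_map.2 ⟨(t, v), hm, rfl⟩
  have hq := PySem.Dict.get?_of_mem_items _ hmem (by rw [hkeys]; exact hnd)
  refine ⟨t, by rw [hq, Function.iterate_one, hf], ?_⟩
  by_cases hy : pvF d t ∈ d.keys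
  · refine Or.inr ⟨fun j hj => ?_, by simp⟩
    interval_cases j
    · simpa using ht
    · simpa using hy
  · exact Or.inl ⟨1, le_rfl, le_rfl, by simpa using hy,
      fun i hi => by interval_cases i; simpa using ht, by simp⟩

theorem pv_square_items {d : PySem.Dict Int (Int × Int)} (hnd : d.keys.Nodup)
    {G : PySem.Dict Int (Int × Int)} (hk : G.keys = d.keys) :
    (pvSquare G).items =
      G.items.map (fun p => (p.1, if G.contains p.2.1 then G.getD p.2.1 (0, 0) else p.2)) := by
  have hGnd : G.keys.Nodup := by rw [hk]; exact hnd
  unfold pvSquare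
  rw [PySem.Dict.items_foldl_insert_fresh G.items (fun p => p.1)
    (fun p => if G.contains p.2.1 then G.getD p.2.1 (0, 0) else p.2)
    PySem.Dict.empty (fun a _ => by simp) (by simpa [PySem.Dict.keys] using hGnd)]
  simp [PySem.Dict.empty]

theorem pv_inv_square {d : PySem.Dict Int (Int × Int)} (hnd : d.keys.Nodup)
    {G : PySem.Dict Int (Int × Int)} {m : Nat} (hm : 1 ≤ m) (h : pvInv2 d G m) :
    pvInv2 d (pvSquare G) (m + m) := by
  obtain ⟨hk, hg⟩ := h
  have hGnd : G.keys.Nodup := by rw [hk]; exact hnd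
  have hitems := pv_square_items hnd hk
  have hkeys : (pvSquare G).keys = d.keys := by
    rw [← hk]; simp [PySem.Dict.keys, hitems, Function.comp_def]
  refine ⟨hkeys, fun t ht => ?_⟩
  obtain ⟨lv, hq, hdisj⟩ := hg t ht
  have hmem_t : (t, ((pvF d)^[m] t, lv)) ∈ G.items :=
    (PySem.Dict.get?_eq_some_iff_mem_items _ _ _ hGnd).1 hq
  have hmem2 : (t, if G.contains ((pvF d)^[m] t) then G.getD ((pvF d)^[m] t) (0, 0)
      else ((pvF d)^[m] t, lv)) ∈ (pvSquare G).items := by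
    rw [hitems]; exact List.mem_map.2 ⟨_, hmem_t, rfl⟩
  have hq2 := PySem.Dict.get?_of_mem_items _ hmem2 (by rw [hkeys]; exact hnd)
  have hcont : G.contains ((pvF d)^[m] t) = decide ((pvF d)^[m] t ∈ d.keys) := by
    rw [PySem.Dict.contains_eq_decide_mem_keys, hk]
  by_cases hy : (pvF d)^[m] t ∈ d.keys
  · -- the first 2^i steps stay inside the keys; compose with the table entry at the midpoint
    rcases hdisj with ⟨j, hj1, hjm, hjex, _, _⟩ | ⟨hallm, hl⟩
    · exact absurd (by rwa [pv_stab hjex hjm] at hy) hjex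
    · obtain ⟨l2, hq3, hdisj2⟩ := hg _ hy
      have hgd : G.getD ((pvF d)^[m] t) (0, 0) = ((pvF d)^[m] ((pvF d)^[m] t), l2) :=
        PySem.Dict.getD_of_get?_eq_some _ _ hq3
      refine ⟨l2, ?_, ?_⟩
      · rw [hq2, if_pos (by rw [hcont]; simpa using hy), hgd, ← Function.iterate_add_apply]
      · rcases hdisj2 with ⟨j2, hj21, hj2m, hex2, hmin2, hl2⟩ | ⟨hall2, hl2⟩
        · refine Or.inl ⟨m + j2, by omega, by omega, ?_, ?_, ?_⟩
          · rw [show m + j2 = j2 + m by omega, Function.iterate_add_apply]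
            exact hex2
          · intro i hi
            by_cases him : i ≤ m
            · exact hallm i him
            · have : i - m < j2 := by omega
              have := hmin2 (i - m) this
              rwa [← Function.iterate_add_apply, show i - m + m = i by omega] at this
          · rw [hl2, ← Function.iterate_add_apply, show j2 - 1 + m = m + j2 - 1 by omega]
        · refine Or.inr ⟨fun j hj => ?_, ?_⟩
          · by_cases hjm' : j ≤ m
            · exact hallm j hjm'
            · have := hall2 (j - m) (by omega)
              rwa [← Function.iterate_add_apply, show j - m + m = j by omega] at this
          · rw [hl2, ← Function.iterate_add_apply, show m - 1 + m = m + m - 1 by omega]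
  · -- the orbit leaves the keys within the first 2^i steps: the entry is already stable
    rcases hdisj with ⟨j, hj1, hjm, hjex, hjmin, hl⟩ | ⟨hallm, _⟩
    · refine ⟨lv, ?_, Or.inl ⟨j, hj1, by omega, hjex, hjmin, hl⟩⟩
      rw [hq2, if_neg (by rw [hcont]; simpa using hy)]
      rw [pv_stab hjex (by omega : j ≤ m + m), ← pv_stab hjex hjm]
    · exact absurd (hallm m le_rfl) hy

theorem pv_inv_lift {d : PySem.Dict Int (Int × Int)} (hnd : d.keys.Nodup)
    (k : Nat) {G : PySem.Dict Int (Int × Int)} {m : Nat} (hm : 1 ≤ m) (h : pvInv2 d G m) :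
    pvInv2 d (pvLift k G) (2 ^ k * m) := by
  induction k generalizing G m with
  | zero => simpa using h
  | succ k ih =>
    have h2 := ih (by omega) (pv_inv_square hnd hm h)
    show pvInv2 d (pvLift k (pvSquare G)) _
    rw [show 2 ^ (k + 1) * m = 2 ^ k * (m + m) by ring]
    exact h2

theorem pv_backA_succ (d : PySem.Dict Int (Int × Int)) (cyc : PySem.Set Int)
    (fuel : Nat) (toI frI : Int) :
    pvBackA d cyc (fuel + 1) toI frI =
      if d.contains frI then
        (if PySem.Set.contains cyc ((d.getD frI (0, 0)).1) then (frI, (d.getD frI (0, 0)).1, true)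
         else pvBackA d cyc fuel frI ((d.getD frI (0, 0)).1))
      else (toI, frI, false) := by
  rw [pvBackA]

theorem pv_fwdA_succ (o : PySem.Dict Int Int) (fuel : Nat) (toI : Int)
    (group : List Int) (proc : PySem.Set Int) :
    pvFwdA o (fuel + 1) toI group proc =
      if o.contains toI then
        pvFwdA o fuel (o.getD toI 0) (group ++ [toI]) (PySem.Set.add proc toI)
      else (group ++ [toI], PySem.Set.add proc toI) := by
  rw [pvFwdA]

theorem pv_chainB_succ (o : PySem.Dict Int Int) (fuel : Nat) (x : Int) (group : List Int) :
    pvChainB o (fuel + 1) x group =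
      if o.contains x then pvChainB o fuel (o.getD x 0) (group ++ [x])
      else group ++ [x] := by
  rw [pvChainB]

theorem pv_backA_exit {d : PySem.Dict Int (Int × Int)} {cycv : Int} :
    ∀ (j fuel : Nat) (toI frI : Int), j < fuel →
    (∀ i < j, (pvF d)^[i] frI ∈ d.keys) → (pvF d)^[j] frI ∉ d.keys →
    (∀ i, 1 ≤ i → i ≤ j → (pvF d)^[i] frI ≠ cycv) →
    pvBackA d (PySem.Set.add PySem.Set.empty cycv) fuel toI frI =
      (if j = 0 then toI else (pvF d)^[j-1] frI, (pvF d)^[j] frI, false) := by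
  intro j
  induction j with
  | zero =>
    intro fuel toI frI hfuel hmem hnot hcyc
    obtain ⟨fuel, rfl⟩ : ∃ f', fuel = f' + 1 := ⟨fuel - 1, by omega⟩
    simp only [Function.iterate_zero_apply] at hnot
    have hc : d.contains frI = false := by rw [pv_contains_eq]; simpa using hnot
    rw [pv_backA_succ, if_neg (by simp [hc])]
    simp
  | succ j ih =>
    intro fuel toI frI hfuel hmem hnot hcyc
    obtain ⟨fuel, rfl⟩ : ∃ f', fuel = f' + 1 := ⟨fuel - 1, by omega⟩
    have h0 : frI ∈ d.keys := by simpa using hmem 0 (by omega)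
    have hc : d.contains frI = true := by rw [pv_contains_eq]; simpa using h0
    have hne1 : pvF d frI ≠ cycv := by
      have := hcyc 1 (by omega) (by omega)
      simpa using this
    have hrec := ih fuel frI (pvF d frI) (by omega)
      (fun i hi => by
        have := hmem (i + 1) (by omega)
        rwa [Function.iterate_succ_apply] at this)
      (by rw [← Function.iterate_succ_apply]; exact hnot)
      (fun i h1 h2 => by
        rw [← Function.iterate_succ_apply]
        exact hcyc (i + 1) (by omega) (by omega))
    rw [pv_backA_succ, if_pos (by simp [hc])]
    rw [pv_getD00 h0, pv_set1_contains, if_neg (by simpa using hne1), hrec]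
    rcases j with _ | j
    · simp
    · simp [Function.iterate_succ_apply]

theorem pv_backA_cyc {d : PySem.Dict Int (Int × Int)} {cycv : Int} :
    ∀ (m fuel : Nat) (toI frI : Int), 1 ≤ m → m ≤ fuel →
    (∀ i < m, (pvF d)^[i] frI ∈ d.keys) → (pvF d)^[m] frI = cycv →
    (∀ i, 1 ≤ i → i < m → (pvF d)^[i] frI ≠ cycv) →
    (pvBackA d (PySem.Set.add PySem.Set.empty cycv) fuel toI frI).2.2 = true := by
  intro m
  induction m with
  | zero => intro fuel toI frI h1; omega
  | succ m ih =>
    intro fuel toI frI _ hfuel hmem hcycle hnocyc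
    obtain ⟨fuel, rfl⟩ : ∃ f', fuel = f' + 1 := ⟨fuel - 1, by omega⟩
    have h0 : frI ∈ d.keys := by simpa using hmem 0 (by omega)
    have hc : d.contains frI = true := by rw [pv_contains_eq]; simpa using h0
    rcases m with _ | m
    · -- detection at the first step: f frI = cycv
      have h1 : pvF d frI = cycv := by simpa using hcycle
      rw [pv_backA_succ, if_pos (by simp [hc]), pv_getD00 h0, pv_set1_contains,
        if_pos (by simpa using h1)]
    · have hne1 : pvF d frI ≠ cycv := by
        have := hnocyc 1 (by omega) (by omega)
        simpa using this
      have hrec := ih fuel frI (pvF d frI) (by omega) (by omega)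
        (fun i hi => by
          have := hmem (i + 1) (by omega)
          rwa [Function.iterate_succ_apply] at this)
        (by rw [← Function.iterate_succ_apply]; exact hcycle)
        (fun i ha hb => by
          rw [← Function.iterate_succ_apply]
          exact hnocyc (i + 1) (by omega) (by omega))
      rw [pv_backA_succ, if_pos (by simp [hc]), pv_getD00 h0, pv_set1_contains,
        if_neg (by simpa using hne1)]
      exact hrec

theorem pv_chainB_append (o : PySem.Dict Int Int) :
    ∀ (fuel : Nat) (x : Int) (acc : List Int),
    pvChainB o fuel x acc = acc ++ pvChainB o fuel x [] := by
  intro fuel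
  induction fuel with
  | zero => intro x acc; simp [pvChainB]
  | succ fuel ih =>
    intro x acc
    by_cases hx : o.contains x = true
    · rw [pv_chainB_succ, pv_chainB_succ, if_pos (by simp [hx]), if_pos (by simp [hx])]
      rw [ih (o.getD x 0) (acc ++ [x]), ih (o.getD x 0) ([] ++ [x])]
      simp
    · rw [pv_chainB_succ, pv_chainB_succ, if_neg (by simp [hx]), if_neg (by simp [hx])]
      simp

theorem pv_fwdA_char (o : PySem.Dict Int Int) :
    ∀ (fuel : Nat) (x : Int) (acc : List Int) (proc : PySem.Set Int),
    pvFwdA o fuel x acc proc =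
      (pvChainB o fuel x acc, PySem.Set.update proc (pvChainB o fuel x [])) := by
  intro fuel
  induction fuel with
  | zero =>
    intro x acc proc
    simp [pvFwdA, pvChainB, PySem.Set.update]
  | succ fuel ih =>
    intro x acc proc
    by_cases hx : o.contains x = true
    · rw [pv_fwdA_succ, if_pos (by simp [hx]),
        pv_chainB_succ, if_pos (by simp [hx]),
        pv_chainB_succ o fuel x ([] : List Int), if_pos (by simp [hx]),
        ih (o.getD x 0) (acc ++ [x]) (PySem.Set.add proc x),
        pv_chainB_append o fuel (o.getD x 0) ([] ++ [x])]
      simp [PySem.Set.update]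
    · rw [pv_fwdA_succ, if_neg (by simp [hx]),
        pv_chainB_succ, if_neg (by simp [hx]),
        pv_chainB_succ o fuel x ([] : List Int), if_neg (by simp [hx])]
      simp [PySem.Set.update]

-- emitting one group: A's interleaved walk equals B's chain plus a single set update
theorem pv_emit_eq (o : PySem.Dict Int Int) (fuel : Nat) (start last : Int)
    (st : PySem.Set Int × List (List Int)) :
    ((pvFwdA o fuel last [start] (PySem.Set.add st.1 start)).2,
      st.2 ++ [(pvFwdA o fuel last [start] (PySem.Set.add st.1 start)).1]) =
    (PySem.Set.update st.1 (pvChainB o fuel last [start]),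
      st.2 ++ [pvChainB o fuel last [start]]) := by
  rw [pv_fwdA_char, pv_chainB_append o fuel last [start]]
  simp [PySem.Set.update]

theorem pv_step_eq {l : List (Int × Int × Int)}
    (hterm : ∀ t ∈ (pvDict l).keys, ∃ i ∈ Finset.Icc 2 ((pvDict l).size + 2),
      (pvF (pvDict l))^[i] t ∉ (pvDict l).keys ∨ (pvF (pvDict l))^[i] t = pvF (pvDict l) t)
    {p : Int × Int × Int} (hp : p ∈ (pvDict l).items) (st : PySem.Set Int × List (List Int)) :
    pvStepA (pvDict l) (pvOut (pvDict l)) st p =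
    pvStepB (pvDict l) (pvOut (pvDict l))
      (pvLift (PySem.Int.bitLength ((pvDict l).size : Int)) (pvJump0 (pvDict l))) st p := by
  have hnd := pv_keys_nodup l
  have hf0 : pvF (pvDict l) p.1 = p.2.1 := pv_f_of_mem hnd hp
  have htk : p.1 ∈ (pvDict l).keys := PySem.Dict.mem_keys_of_mem_items _ hp
  have hinv := pv_inv_lift hnd (PySem.Int.bitLength (((pvDict l).size : Int))) le_rfl (pv_inv0 hnd)
  have h2p : (pvDict l).size < 2 ^ PySem.Int.bitLength (((pvDict l).size : Int)) * 1 := by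
    have := PySem.Int.lt_two_pow_bitLength (((pvDict l).size : Int))
    simpa using this
  unfold pvStepA pvStepB
  by_cases hskip : PySem.Set.contains st.1 p.1 = true
  · rw [if_pos hskip, if_pos hskip]
  · rw [if_neg hskip, if_neg hskip]
    by_cases hf0K : p.2.1 ∈ (pvDict l).keys
    · -- the first hop lands on a key: read the jump table
      obtain ⟨lv, hq, hdisj⟩ := hinv.2 p.2.1 hf0K
      have hgd : (pvLift (PySem.Int.bitLength (((pvDict l).size : Int))) (pvJump0 (pvDict l))).getD
          p.2.1 (p.2.1, p.1) = ((pvF (pvDict l))^[2 ^ PySem.Int.bitLength (((pvDict l).size : Int)) * 1] p.2.1, lv) :=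
        PySem.Dict.getD_of_get?_eq_some _ _ hq
      rcases hdisj with ⟨j, hj1, hjm, hjex, hjmin, hl⟩ | ⟨hall0, _⟩
      · -- the backward orbit leaves the keys: both sides emit the same group
        have hjn : j ≤ (pvDict l).size + 1 := by
          by_contra hbig
          exact hjex (pv_all_mem (fun i hi => hjmin i (by omega)) j)
        have hnocyc : ∀ i, 1 ≤ i → i ≤ j → (pvF (pvDict l))^[i] p.2.1 ≠ p.2.1 := by
          intro i h1 h2 hcon
          have h0i : (pvF (pvDict l))^[0] p.2.1 = (pvF (pvDict l))^[i] p.2.1 := by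
            simpa using hcon.symm
          obtain ⟨j', hj', he'⟩ := pv_dup_bound (by omega : 0 < i) h0i j
          exact hjex (by rw [he']; exact hjmin j' (by omega))
        have hA := pv_backA_exit j ((pvDict l).size + 2) p.1 p.2.1 (by omega) hjmin hjex hnocyc
        have hstab : (pvF (pvDict l))^[2 ^ PySem.Int.bitLength (((pvDict l).size : Int)) * 1] p.2.1
            = (pvF (pvDict l))^[j] p.2.1 := pv_stab hjex (by omega)
        have hcB : (pvDict l).contains ((pvF (pvDict l))^[j] p.2.1) = false := by
          rw [pv_contains_eq]; simpa using hjex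
        have hto : (if j = 0 then p.1 else (pvF (pvDict l))^[j-1] p.2.1) = lv := by
          rw [if_neg (by omega), hl]
        simp only [hA, hgd, hcB, Bool.false_eq_true, if_false, hto, hstab]
        exact pv_emit_eq (pvOut (pvDict l)) ((pvDict l).size + 2) ((pvF (pvDict l))^[j] p.2.1) lv st
      · -- the backward orbit is trapped in a cycle: both sides skip this entry
        have hall : ∀ i, (pvF (pvDict l))^[i] p.2.1 ∈ (pvDict l).keys :=
          pv_all_mem (fun i hi => hall0 i (by omega))
        have hcB : (pvDict l).contains ((pvF (pvDict l))^[2 ^ PySem.Int.bitLength (((pvDict l).size : Int)) * 1] p.2.1) = true := by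
          rw [pv_contains_eq]; simpa using hall _
        obtain ⟨i, hi, hdisj2⟩ := hterm p.1 htk
        rw [Finset.mem_Icc] at hi
        have hshift : (pvF (pvDict l))^[i] p.1 = (pvF (pvDict l))^[i-1] p.2.1 := by
          obtain ⟨i', rfl⟩ : ∃ i', i = i' + 1 := ⟨i - 1, by omega⟩
          rw [Function.iterate_succ_apply, hf0]
          simp
        rcases hdisj2 with hbad | hcy
        · exact absurd (hall (i-1)) (by rwa [hshift] at hbad)
        · have hcyc0 : (pvF (pvDict l))^[i-1] p.2.1 = p.2.1 := by rw [← hshift, hcy, hf0]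
          have hex2 : ∃ m, 0 < m ∧ (pvF (pvDict l))^[m] p.2.1 = p.2.1 := ⟨i - 1, by omega, hcyc0⟩
          have hmm := Nat.find_spec hex2
          have hmmle : Nat.find hex2 ≤ i - 1 := Nat.find_min' hex2 ⟨by omega, hcyc0⟩
          have hAc := pv_backA_cyc (Nat.find hex2) ((pvDict l).size + 2) p.1 p.2.1 hmm.1 (by omega)
            (fun i' _ => hall i') hmm.2
            (fun i' h1 h2 hcon => (Nat.find_min hex2 h2) ⟨h1, hcon⟩)
          simp only [hAc, hgd, hcB, if_true]
    · -- the first hop already leaves the keys: the chain starts right there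
      have hA := pv_backA_exit (cycv := p.2.1) 0 ((pvDict l).size + 2) p.1 p.2.1 (by omega)
        (fun i hi => absurd hi (by omega)) (by simpa using hf0K)
        (fun i h1 h2 => absurd h2 (by omega))
      have hgd : (pvLift (PySem.Int.bitLength (((pvDict l).size : Int))) (pvJump0 (pvDict l))).getD
          p.2.1 (p.2.1, p.1) = (p.2.1, p.1) := by
        apply PySem.Dict.getD_of_not_contains
        rw [PySem.Dict.contains_eq_decide_mem_keys, hinv.1]
        simpa using hf0K
      have hcB : (pvDict l).contains p.2.1 = false := by
        rw [pv_contains_eq]; simpa using hf0K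
      simp only [hA, hgd, hcB, Bool.false_eq_true, if_false, Function.iterate_zero_apply, if_pos rfl]
      exact pv_emit_eq (pvOut (pvDict l)) ((pvDict l).size + 2) p.2.1 p.1 st

-- ===== VERDICT (by name: the statement is the Claim_ definition above) =====
theorem in_chain_to_groups_spec : Claim_equal_in_chain_to_groups := by
  intro in_chain num_regions _hdom hterm
  unfold Spec_in_chain_to_groups
  have key : (pvDict in_chain).items.foldl (pvStepA (pvDict in_chain) (pvOut (pvDict in_chain))) (PySem.Set.empty, []) =
      (pvDict in_chain).items.foldl (pvStepB (pvDict in_chain) (pvOut (pvDict in_chain))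
        (pvLift (PySem.Int.bitLength ((pvDict in_chain).size : Int)) (pvJump0 (pvDict in_chain)))) (PySem.Set.empty, []) :=
    PySem.List.foldl_congr_mem' _ _ _ _ (fun p hp st => pv_step_eq hterm hp st)
  simp only [in_chain_to_groups, in_chain_to_groups_alt, key]
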